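-- pv_equiv track=rewrite | github.com/zn-cn/MachineLearning-Andrew-Ng | SeedCup2017/初赛/BasketballMatch/matchDataInit.py | getWinAndLose
-- ===== SOURCE A (Python) =====
-- def getWinAndLose(str):
--     number = '0123456789'
--     flag = True  #flag to find win or lose
--     win = ''
--     lose = ''
--     for char in str:
--         if char in number:
--             if flag:
--                 win = win + char
--             else:
--                 lose = lose + char
--         else:
--             flag = False
--     return win, lose
-- ===== SOURCE B (Python) =====
-- def getWinAndLose(str):
--     digits = '0123456789'
--     i = 0
--     while i < len(str) and str[i] in digits:
--         i += 1
--     win = str[:i]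
--     lose = ''.join(c for c in str[i:] if c in digits)
--     return win, lose
-- ===== Notes on version B (the rewrite author's own statement) =====
-- stated objective: simpler
-- what changed: Replaces the flag state-machine accumulating two strings with a locate-boundary decomposition: take the leading digit run as win, then filter digits from the remainder as lose.
import Mathlib
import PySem

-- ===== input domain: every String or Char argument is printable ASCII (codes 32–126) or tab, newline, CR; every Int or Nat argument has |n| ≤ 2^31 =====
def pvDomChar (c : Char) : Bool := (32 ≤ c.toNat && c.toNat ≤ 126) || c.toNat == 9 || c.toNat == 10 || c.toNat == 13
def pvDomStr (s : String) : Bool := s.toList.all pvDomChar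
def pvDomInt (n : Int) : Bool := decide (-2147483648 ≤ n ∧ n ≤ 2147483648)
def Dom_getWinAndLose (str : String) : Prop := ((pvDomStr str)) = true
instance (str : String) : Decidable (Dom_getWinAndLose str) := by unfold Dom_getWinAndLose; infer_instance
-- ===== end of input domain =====

-- B replaces A's flag state-machine by a locate-boundary decomposition (leading digit run = win, digits of the rest = lose); objective: simpler.


-- ===== PORT A =====
-- 'char in number' with number = '0123456789'
def pvIsNum (c : Char) : Bool := ("0123456789".toList).contains c

-- one iteration of A's for-loop over state (flag, win, lose)
def pvStepA (st : Bool × List Char × List Char) (c : Char) : Bool × List Char × List Char :=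
  if pvIsNum c then
    if st.1 then (st.1, st.2.1 ++ [c], st.2.2)
    else (st.1, st.2.1, st.2.2 ++ [c])
  else (false, st.2.1, st.2.2)

def getWinAndLose (str : String) : String × String :=
  let r := str.toList.foldl pvStepA (true, [], [])
  (String.ofList r.2.1, String.ofList r.2.2)

-- ===== PORT B =====
def getWinAndLose_alt (str : String) : String × String :=
  let l := str.toList
  let win := l.takeWhile pvIsNum          -- scan the leading digit run
  let rest := l.drop win.length           -- str[i:]
  (String.ofList win, String.ofList (rest.filter pvIsNum))

-- ===== PRECONDITION & SPEC =====
def Spec_getWinAndLose (str : String) (out : String × String) : Prop := out = getWinAndLose_alt str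
instance (str : String) (out : String × String) : Decidable (Spec_getWinAndLose str out) := by unfold Spec_getWinAndLose; infer_instance

-- ===== CLAIM (what is proved, stated in full; the proofs are below) =====
def Claim_equal_getWinAndLose : Prop := ∀ (str : String), Dom_getWinAndLose str → Spec_getWinAndLose str (getWinAndLose str)

-- ===== LEMMAS AND PROOFS =====
theorem foldl_stepA_false (l : List Char) (w lo : List Char) :
    l.foldl pvStepA (false, w, lo) = (false, w, lo ++ l.filter pvIsNum) := by
  induction l generalizing lo with
  | nil => simp
  | cons c t ih =>
    by_cases h : pvIsNum c <;>
      simp [pvStepA, h, ih]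

theorem foldl_stepA_true (l : List Char) (w lo : List Char) :
    l.foldl pvStepA (true, w, lo) =
      ((l.takeWhile pvIsNum).length == l.length, w ++ l.takeWhile pvIsNum,
        lo ++ (l.drop (l.takeWhile pvIsNum).length).filter pvIsNum) := by
  induction l generalizing w with
  | nil => simp
  | cons c t ih =>
    by_cases h : pvIsNum c
    · simp [pvStepA, h, ih]
    · simp [pvStepA, h, foldl_stepA_false]

-- ===== VERDICT (by name: the statement is the Claim_ definition above) =====
theorem getWinAndLose_spec : Claim_equal_getWinAndLose := by
  intro s _
  unfold Spec_getWinAndLose getWinAndLose getWinAndLose_alt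
  simp [foldl_stepA_true]
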